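-- pv_equiv track=rewrite | github.com/emelmusekor/260309AIED2.0 | aied-web/build_report_site.py | graph_cooccurrence
-- ===== SOURCE A (Python) =====
-- def graph_cooccurrence(left: list[str], right: list[str], units: list[set[str]]) -> int:
--     if not left or not right:
--         return 0
--     score = 0
--     for token_set in units:
--         left_hit = any(query in token_set or any(query in token for token in token_set) for query in left)
--         right_hit = any(query in token_set or any(query in token for token in token_set) for query in right)
--         if left_hit and right_hit:
--             score += 1
--     return score
-- ===== SOURCE B (Python) =====
-- def graph_cooccurrence(left: list[str], right: list[str], units: list[set[str]]) -> int:
--     # Inverted pass shape: instead of testing each unit against both query lists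
--     # and counting in one pass, collect (query-outer loop) the set of unit
--     # indices matched by each side, then count the intersection.  A unit already
--     # matched is skipped for later queries.  Empty query lists yield an empty
--     # index set, so no guard is needed.
--     def matched(queries):
--         hits = set()
--         for q in queries:
--             for i, ts in enumerate(units):
--                 if i not in hits and (q in ts or any(q in tok for tok in ts)):
--                     hits.add(i)
--         return hits
--     return len(matched(left) & matched(right))
-- ===== Notes on version B (the rewrite author's own statement) =====
-- stated objective: alternative
-- what changed: Inverts the loop nesting: instead of one pass over units testing each token set against both query lists and incrementing a counter, B loops query-outer to build two sets of matched unit indices and returns the size of their intersection; the redundant set-membership test and the empty-list early return disappear.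
import Mathlib
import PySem

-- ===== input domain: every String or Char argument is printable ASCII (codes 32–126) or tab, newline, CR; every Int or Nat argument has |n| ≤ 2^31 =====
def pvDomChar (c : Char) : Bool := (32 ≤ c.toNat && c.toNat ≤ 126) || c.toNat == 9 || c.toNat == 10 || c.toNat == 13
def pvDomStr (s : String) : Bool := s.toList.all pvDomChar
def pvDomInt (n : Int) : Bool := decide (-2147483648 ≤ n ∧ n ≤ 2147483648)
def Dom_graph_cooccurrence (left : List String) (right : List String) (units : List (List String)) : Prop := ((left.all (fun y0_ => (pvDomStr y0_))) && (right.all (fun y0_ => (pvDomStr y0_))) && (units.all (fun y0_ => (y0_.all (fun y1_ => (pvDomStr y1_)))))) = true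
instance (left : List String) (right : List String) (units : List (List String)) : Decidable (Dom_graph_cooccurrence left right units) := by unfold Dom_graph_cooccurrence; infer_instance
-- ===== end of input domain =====

-- B inverts the loop nesting: query-outer passes build two sets of matched unit
-- indices whose intersection is counted, instead of A's unit-outer pass testing
-- both query lists per unit (objective: alternative).
-- ===== PORT A =====
def graph_cooccurrence (left : List String) (right : List String) (units : List (List String)) : Int :=
  if left = [] || right = [] then 0
  else
    units.foldl (fun score token_set =>
      let left_hit := left.any (fun query =>
        PySem.Set.contains token_set query || token_set.any (fun token => PySem.Str.isIn query token))
      let right_hit := right.any (fun query =>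
        PySem.Set.contains token_set query || token_set.any (fun token => PySem.Str.isIn query token))
      if left_hit && right_hit then score + 1 else score) 0

-- ===== PORT B =====
-- inner loop body: one unit (index, token set) against one query
def pvScanUnit (q : String) (hits : PySem.Set Int) (p : Int × List String) : PySem.Set Int :=
  if !(PySem.Set.contains hits p.1) && (PySem.Set.contains p.2 q || p.2.any (fun tok => PySem.Str.isIn q tok))
  then PySem.Set.add hits p.1 else hits

-- 'for i, ts in enumerate(units): …' for one query
def pvScanQuery (units : List (List String)) (hits : PySem.Set Int) (q : String) : PySem.Set Int :=
  (PySem.List.enumerate units).foldl (pvScanUnit q) hits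

-- matched(queries): query-outer accumulation of matched unit indices
def pvMatchedIdx (queries : List String) (units : List (List String)) : PySem.Set Int :=
  queries.foldl (pvScanQuery units) PySem.Set.empty

def graph_cooccurrence_alt (left : List String) (right : List String) (units : List (List String)) : Int :=
  PySem.Set.len (PySem.Set.inter (pvMatchedIdx left units) (pvMatchedIdx right units))

-- ===== PRECONDITION & SPEC =====
def Spec_graph_cooccurrence (left : List String) (right : List String) (units : List (List String)) (out : Int) : Prop := out = graph_cooccurrence_alt left right units
instance (left : List String) (right : List String) (units : List (List String)) (out : Int) : Decidable (Spec_graph_cooccurrence left right units out) := by unfold Spec_graph_cooccurrence; infer_instance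

-- ===== CLAIM (what is proved, stated in full; the proofs are below) =====
def Claim_equal_graph_cooccurrence : Prop := ∀ (left : List String) (right : List String) (units : List (List String)), Dom_graph_cooccurrence left right units → Spec_graph_cooccurrence left right units (graph_cooccurrence left right units)

-- ===== LEMMAS AND PROOFS =====
-- "some query of qs matches token set ts" (substring-only form)
def pvQ (qs ts : List String) : Bool := qs.any (fun q => ts.any (fun t => PySem.Str.isIn q t))

-- A's per-unit hit test (membership-or-substring) equals the substring-only pvQ:
-- membership q ∈ ts yields q as a substring of itself.
lemma hit_eq (qs ts : List String) :
    (qs.any fun q => PySem.Set.contains ts q || ts.any fun t => PySem.Str.isIn q t) = pvQ qs ts := by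
  rw [Bool.eq_iff_iff]
  simp only [pvQ, List.any_eq_true, Bool.or_eq_true]
  constructor
  · rintro ⟨q, hq, h | ⟨t, ht, hs⟩⟩
    · exact ⟨q, hq, q, (PySem.Set.contains_iff ts q).mp h,
        (PySem.Str.isIn_iff_infix q q).mpr (List.infix_refl _)⟩
    · exact ⟨q, hq, t, ht, hs⟩
  · rintro ⟨q, hq, t, ht, hs⟩
    exact ⟨q, hq, Or.inr ⟨t, ht, hs⟩⟩

-- per-(query, unit) hit condition, as in A and in B's inner test
def pvC (q : String) (ts : List String) : Bool :=
  PySem.Set.contains ts q || ts.any (fun tok => PySem.Str.isIn q tok)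

lemma exists_pvC_iff (qs ts : List String) :
    (∃ q ∈ qs, pvC q ts = true) ↔ pvQ qs ts = true := by
  rw [← hit_eq qs ts, List.any_eq_true]
  simp only [pvC]

lemma mem_scanQuery (q : String) (us : List (List String)) (s : Int)
    (hits : PySem.Set Int) (i : Int) :
    i ∈ (PySem.List.enumerate us s).foldl (pvScanUnit q) hits ↔
      i ∈ hits ∨ ∃ (k : Nat) (h : k < us.length), i = s + k ∧ pvC q us[k] = true := by
  induction us generalizing s hits with
  | nil => simp [PySem.List.enumerate_nil]
  | cons hd tl ih =>
    rw [PySem.List.enumerate_cons, List.foldl_cons, ih]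
    have hacc : i ∈ pvScanUnit q hits (s, hd) ↔ i ∈ hits ∨ (i = s ∧ pvC q hd = true) := by
      unfold pvScanUnit
      split
      · rename_i hcond
        simp only [Bool.and_eq_true, Bool.not_eq_eq_eq_not, Bool.not_true] at hcond
        rw [PySem.Set.mem_add]
        exact ⟨fun h => h.imp id (fun he => ⟨he, hcond.2⟩), fun h => h.imp id (fun he => he.1)⟩
      · rename_i hcond
        constructor
        · exact Or.inl
        · rintro (h | ⟨rfl, hc⟩)
          · exact h
          · by_cases hin : PySem.Set.contains hits i = true
            · exact (PySem.Set.contains_iff hits i).mp hin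
            · exfalso
              apply hcond
              simp only [Bool.and_eq_true, Bool.not_eq_eq_eq_not, Bool.not_true]
              exact ⟨by simpa using hin, by simpa [pvC] using hc⟩
    rw [hacc]
    constructor
    · rintro ((h | ⟨rfl, hc⟩) | ⟨k, hk, rfl, hc⟩)
      · exact Or.inl h
      · exact Or.inr ⟨0, by simp, by simp, by simpa using hc⟩
      · exact Or.inr ⟨k + 1, by simpa using hk, by push_cast; ring, by simpa using hc⟩
    · rintro (h | ⟨k, hk, rfl, hc⟩)
      · exact Or.inl (Or.inl h)
      · cases k with
        | zero => exact Or.inl (Or.inr ⟨by simp, by simpa using hc⟩)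
        | succ k =>
          exact Or.inr ⟨k, by simpa using hk, by push_cast; ring, by simpa using hc⟩

lemma nodup_scanQuery (q : String) (us : List (List String)) (s : Int)
    (hits : PySem.Set Int) (hn : hits.Nodup) :
    ((PySem.List.enumerate us s).foldl (pvScanUnit q) hits).Nodup := by
  induction us generalizing s hits with
  | nil => simpa [PySem.List.enumerate_nil] using hn
  | cons hd tl ih =>
    rw [PySem.List.enumerate_cons, List.foldl_cons]
    refine ih (s + 1) _ ?_
    unfold pvScanUnit
    split
    · exact PySem.Set.nodup_add _ _ hn
    · exact hn

lemma mem_outer (qs : List String) (units : List (List String))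
    (hits : PySem.Set Int) (i : Int) :
    i ∈ qs.foldl (pvScanQuery units) hits ↔
      i ∈ hits ∨ ∃ q ∈ qs, ∃ (k : Nat) (h : k < units.length), i = (k : Int) ∧ pvC q units[k] = true := by
  induction qs generalizing hits with
  | nil => simp
  | cons q qs ih =>
    rw [List.foldl_cons, ih]
    unfold pvScanQuery
    rw [mem_scanQuery q units 0 hits i]
    constructor
    · rintro ((h | ⟨k, hk, hik, hc⟩) | ⟨q', hq', k, hk, hik, hc⟩)
      · exact Or.inl h
      · exact Or.inr ⟨q, List.mem_cons_self, k, hk, by omega, hc⟩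
      · exact Or.inr ⟨q', List.mem_cons_of_mem _ hq', k, hk, hik, hc⟩
    · rintro (h | ⟨q', hq', k, hk, hik, hc⟩)
      · exact Or.inl (Or.inl h)
      · rcases List.mem_cons.mp hq' with rfl | hq''
        · exact Or.inl (Or.inr ⟨k, hk, by omega, hc⟩)
        · exact Or.inr ⟨q', hq'', k, hk, hik, hc⟩

lemma nodup_matchedIdx (qs : List String) (units : List (List String)) :
    (pvMatchedIdx qs units).Nodup := by
  unfold pvMatchedIdx
  have h : ∀ (hits : PySem.Set Int), hits.Nodup → (qs.foldl (pvScanQuery units) hits).Nodup := by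
    induction qs with
    | nil => exact fun hits hn => hn
    | cons q qs ih =>
      intro hits hn
      rw [List.foldl_cons]
      exact ih _ (nodup_scanQuery q units 0 hits hn)
  exact h PySem.Set.empty (by simp [PySem.Set.empty])

-- membership in B's index set
lemma mem_matchedIdx (qs : List String) (units : List (List String)) (i : Int) :
    i ∈ pvMatchedIdx qs units ↔
      ∃ (k : Nat) (h : k < units.length), i = (k : Int) ∧ pvQ qs units[k] = true := by
  unfold pvMatchedIdx
  rw [mem_outer]
  simp only [PySem.Set.empty, List.not_mem_nil, false_or]
  constructor
  · rintro ⟨q, hq, k, hk, rfl, hc⟩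
    exact ⟨k, hk, rfl, (exists_pvC_iff qs units[k]).mp ⟨q, hq, hc⟩⟩
  · rintro ⟨k, hk, rfl, hQ⟩
    rcases (exists_pvC_iff qs units[k]).mpr hQ with ⟨q, hq, hc⟩
    exact ⟨q, hq, k, hk, rfl, hc⟩

-- reference list of matched indices, for counting
def pvRef (P : List String → Bool) (us : List (List String)) (s : Int) : List Int :=
  (PySem.List.enumerate us s).filterMap (fun p => if P p.2 then some p.1 else none)

lemma ref_cons (P : List String → Bool) (hd : List String) (tl : List (List String)) (s : Int) :
    pvRef P (hd :: tl) s = (if P hd then [s] else []) ++ pvRef P tl (s + 1) := by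
  by_cases h : P hd = true
  · simp [pvRef, PySem.List.enumerate_cons, h]
  · simp [pvRef, PySem.List.enumerate_cons, h]

lemma mem_ref (P : List String → Bool) (us : List (List String)) (s i : Int) :
    i ∈ pvRef P us s ↔ ∃ (k : Nat) (h : k < us.length), i = s + k ∧ P us[k] = true := by
  induction us generalizing s with
  | nil => simp [pvRef, PySem.List.enumerate_nil]
  | cons hd tl ih =>
    rw [ref_cons]
    constructor
    · intro h
      rcases List.mem_append.mp h with h1 | h2
      · split at h1
        · rename_i hp
          rcases List.mem_singleton.mp h1 with rfl
          exact ⟨0, by simp, by simp, hp⟩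
        · cases h1
      · rcases (ih (s + 1)).mp h2 with ⟨k, hk, rfl, hPk⟩
        exact ⟨k + 1, by simpa using hk, by push_cast; ring, by simpa using hPk⟩
    · rintro ⟨k, hk, rfl, hPk⟩
      cases k with
      | zero =>
        simp only [List.getElem_cons_zero] at hPk
        exact List.mem_append.mpr (Or.inl (by simp [hPk]))
      | succ k =>
        refine List.mem_append.mpr (Or.inr ?_)
        exact (ih (s + 1)).mpr ⟨k, by simpa using hk, by push_cast; ring, by simpa using hPk⟩

lemma nodup_ref (P : List String → Bool) (us : List (List String)) (s : Int) :
    (pvRef P us s).Nodup := by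
  induction us generalizing s with
  | nil => simp [pvRef, PySem.List.enumerate_nil]
  | cons hd tl ih =>
    rw [ref_cons]
    split
    · simp only [List.singleton_append]
      refine List.nodup_cons.mpr ⟨?_, ih (s + 1)⟩
      intro hmem
      rcases (mem_ref P tl (s + 1) s).mp hmem with ⟨k, hk, habs, _⟩
      omega
    · simpa using ih (s + 1)

lemma length_ref (P : List String → Bool) (us : List (List String)) (s : Int) :
    (pvRef P us s).length = us.countP P := by
  induction us generalizing s with
  | nil => simp [pvRef, PySem.List.enumerate_nil]
  | cons hd tl ih =>
    rw [ref_cons, List.length_append, List.countP_cons, ih (s + 1)]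
    split
    · simp
      omega
    · simp

-- the intersection of the two index sets is a permutation of the reference list
lemma inter_length (l r : List String) (units : List (List String)) :
    (PySem.Set.inter (pvMatchedIdx l units) (pvMatchedIdx r units)).length
      = units.countP (fun ts => pvQ l ts && pvQ r ts) := by
  have hnod₁ : (PySem.Set.inter (pvMatchedIdx l units) (pvMatchedIdx r units)).Nodup :=
    by apply PySem.Set.nodup_inter; exact nodup_matchedIdx l units
  have hnod₂ := nodup_ref (fun ts => pvQ l ts && pvQ r ts) units 0
  have hperm : List.Perm (PySem.Set.inter (pvMatchedIdx l units) (pvMatchedIdx r units))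
      (pvRef (fun ts => pvQ l ts && pvQ r ts) units 0) := by
    rw [List.perm_ext_iff_of_nodup hnod₁ hnod₂]
    intro i
    rw [PySem.Set.mem_inter, mem_matchedIdx, mem_matchedIdx,
      mem_ref (fun ts => pvQ l ts && pvQ r ts) units 0 i]
    constructor
    · rintro ⟨⟨k, hk, hik, hL⟩, ⟨k', hk', hik', hR⟩⟩
      have hkeq : k' = k := by omega
      subst hkeq
      exact ⟨k', hk', by omega, by simp [hL, hR]⟩
    · rintro ⟨k, hk, rfl, hB⟩
      simp only [Bool.and_eq_true] at hB
      exact ⟨⟨k, hk, by omega, hB.1⟩, ⟨k, hk, by omega, hB.2⟩⟩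
  rw [hperm.length_eq, length_ref]

lemma alt_eq_countP (l r : List String) (units : List (List String)) :
    graph_cooccurrence_alt l r units
      = (units.countP (fun ts => pvQ l ts && pvQ r ts) : Int) := by
  unfold graph_cooccurrence_alt
  simp only [PySem.Set.len]
  rw [inter_length]

lemma pvQ_nil (ts : List String) : pvQ [] ts = false := by simp [pvQ]

-- ===== VERDICT (by name: the statement is the Claim_ definition above) =====
theorem graph_cooccurrence_spec : Claim_equal_graph_cooccurrence := by
  intro l r units _
  unfold Spec_graph_cooccurrence
  rw [alt_eq_countP]
  unfold graph_cooccurrence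
  by_cases hl : l = []
  · subst hl
    simp [pvQ_nil]
  by_cases hr : r = []
  · subst hr
    simp [pvQ_nil]
  simp only [hl, hr, Bool.or_self, decide_false, hit_eq]
  rw [PySem.List.foldl_count_if (fun ts => pvQ l ts && pvQ r ts) units 0]
  simp
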